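-- pv_equiv track=rewrite | github.com/mihirjoshi2025-code/Table-Tennis-Fantasy | backend/tests/test_simulation_determinism.py | _make_phase2_roster_7_active
-- ===== SOURCE A (Python) =====
-- def _make_phase2_roster_7_active(player_ids: list[str], captain_index: int = 0) -> list[tuple[str, int, bool, str | None]]:
--     """Roster: slots 1-7 active, 8-10 bench; one captain in 1-7; no roles."""
--     roster: list[tuple[str, int, bool, str | None]] = []
--     for i, pid in enumerate(player_ids[:10]):
--         slot = i + 1
--         is_captain = i == captain_index and slot <= 7
--         roster.append((pid, slot, is_captain, None))
--     while len(roster) < 10: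
--         roster.append((player_ids[-1], len(roster) + 1, False, None))
--     return roster[:10]
-- ===== SOURCE B (Python) =====
-- def _make_phase2_roster_7_active(player_ids: list[str], captain_index: int = 0) -> list[tuple[str, int, bool, str | None]]:
--     """Roster: slots 1-7 active, 8-10 bench; one captain in 1-7; no roles."""
--     last = player_ids[-1]
--
--     def go(pids: list[str], slot: int) -> list[tuple[str, int, bool, str | None]]:
--         if slot > 10:
--             return []
--         if pids:
--             cap = slot - 1 == captain_index and slot <= 7
--             return [(pids[0], slot, cap, None)] + go(pids[1:], slot + 1)
--         return [(last, slot, False, None)] + go(pids, slot + 1)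
--
--     return go(player_ids, 1)
-- ===== Notes on version B (the rewrite author's own statement) =====
-- stated objective: alternative
-- what changed: Replaces A's build-then-pad pair of loops (enumerate over the sliced list, then a while-loop padding up to 10, then a final slice) by a single structural recursion that consumes the player list with a slot counter, switching to padding entries once the list is exhausted; no slicing, padding pass or length inspection is performed.
import Mathlib
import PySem

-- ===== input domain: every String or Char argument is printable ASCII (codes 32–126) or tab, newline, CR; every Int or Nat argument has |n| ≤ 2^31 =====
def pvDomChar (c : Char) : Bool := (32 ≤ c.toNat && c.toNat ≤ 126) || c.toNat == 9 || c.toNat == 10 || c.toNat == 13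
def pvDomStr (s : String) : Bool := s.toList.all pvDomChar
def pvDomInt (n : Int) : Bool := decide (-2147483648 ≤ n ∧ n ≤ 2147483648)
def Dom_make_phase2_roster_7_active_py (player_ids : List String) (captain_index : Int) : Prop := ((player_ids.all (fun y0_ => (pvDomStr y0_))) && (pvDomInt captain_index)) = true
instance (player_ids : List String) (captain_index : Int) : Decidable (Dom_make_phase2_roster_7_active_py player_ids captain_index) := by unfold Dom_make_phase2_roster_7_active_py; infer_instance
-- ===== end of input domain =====

-- B replaces A's build-then-pad loops by one structural recursion consuming the player list with a slot counter (objective: alternative decomposition).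

-- ===== PORT A =====
-- the 'while len(roster) < 10' padding loop; 'last' is player_ids[-1]
def pvA_pad (last : String) (roster : List (String × Int × Bool × Option String)) :
    List (String × Int × Bool × Option String) :=
  if roster.length < 10 then
    pvA_pad last (roster ++ [(last, (roster.length : Int) + 1, false, none)])
  else roster
termination_by 10 - roster.length

def make_phase2_roster_7_active_py (player_ids : List String) (captain_index : Int) :
    List (String × Int × Bool × Option String) :=
  let roster := (PySem.List.enumerate (PySem.List.slice player_ids none (some 10)) 0).foldl
    (fun r p =>
      let slot := p.1 + 1
      let is_captain := decide (p.1 = captain_index) && decide (slot ≤ 7)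
      r ++ [(p.2, slot, is_captain, (none : Option String))]) []
  -- player_ids[-1]: pyGet? is none only for player_ids = [], which Pre_ excludes (Python raises IndexError there)
  let roster := pvA_pad ((PySem.List.pyGet? player_ids (-1)).getD "") roster
  PySem.List.slice roster none (some 10)

-- ===== PORT B =====
-- 'go' from Source B; Python's 'if slot > 10: return []' bound is carried as the Nat fuel 11 - slot,
-- so the recursion is exact step for step.
def pvB_go (last : String) (captain_index : Int) : Nat → List String → Int →
    List (String × Int × Bool × Option String)
  | 0, _, _ => []
  | k + 1, p :: rest, slot =>
      (p, slot, decide (slot - 1 = captain_index) && decide (slot ≤ 7), (none : Option String)) ::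
        pvB_go last captain_index k rest (slot + 1)
  | k + 1, [], slot =>
      (last, slot, false, (none : Option String)) :: pvB_go last captain_index k [] (slot + 1)

def make_phase2_roster_7_active_py_alt (player_ids : List String) (captain_index : Int) :
    List (String × Int × Bool × Option String) :=
  -- player_ids[-1]: pyGet? is none only for player_ids = [], excluded by Pre_
  let last := (PySem.List.pyGet? player_ids (-1)).getD ""
  pvB_go last captain_index 10 player_ids 1

-- ===== PRECONDITION & SPEC =====
-- Pre_ excludes only the empty list, on which both A and B raise IndexError (player_ids[-1]).
def Pre_make_phase2_roster_7_active_py (player_ids : List String) (captain_index : Int) : Prop :=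
  player_ids ≠ []
instance (player_ids : List String) (captain_index : Int) : Decidable (Pre_make_phase2_roster_7_active_py player_ids captain_index) := by unfold Pre_make_phase2_roster_7_active_py; infer_instance

def pvWitness_make_phase2_roster_7_active_py : List String × Int := (["p1", "p2"], 0)

def Spec_make_phase2_roster_7_active_py (player_ids : List String) (captain_index : Int) (out : List (String × Int × Bool × Option String)) : Prop := out = make_phase2_roster_7_active_py_alt player_ids captain_index
instance (player_ids : List String) (captain_index : Int) (out : List (String × Int × Bool × Option String)) : Decidable (Spec_make_phase2_roster_7_active_py player_ids captain_index out) := by unfold Spec_make_phase2_roster_7_active_py; infer_instance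

-- ===== CLAIM (what is proved, stated in full; the proofs are below) =====
def Claim_equal_make_phase2_roster_7_active_py : Prop := ∀ (player_ids : List String) (captain_index : Int), Dom_make_phase2_roster_7_active_py player_ids captain_index → Pre_make_phase2_roster_7_active_py player_ids captain_index → Spec_make_phase2_roster_7_active_py player_ids captain_index (make_phase2_roster_7_active_py player_ids captain_index)

-- ===== LEMMAS AND PROOFS =====

-- ===== VERDICT (by name: the statement is the Claim_ definition above) =====
theorem make_phase2_roster_7_active_py_spec : Claim_equal_make_phase2_roster_7_active_py := by
  intro xs c _hdom hpre
  unfold Spec_make_phase2_roster_7_active_py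
  rcases xs with _|⟨a0,_|⟨a1,_|⟨a2,_|⟨a3,_|⟨a4,_|⟨a5,_|⟨a6,_|⟨a7,_|⟨a8,_|⟨a9,rest⟩⟩⟩⟩⟩⟩⟩⟩⟩⟩
  · exact absurd rfl hpre
  all_goals
    simp [make_phase2_roster_7_active_py, make_phase2_roster_7_active_py_alt, pvA_pad, pvB_go,
      PySem.List.enumerate, PySem.List.slice, PySem.List.clampIdx, PySem.List.pyGet?,
      PySem.List.pyIdx?]
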